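-- pv_equiv track=rewrite | github.com/TomKite57/advent_of_code_2023 | day_13.py | get_checksum_2
-- ===== SOURCE A (Python) =====
-- from collections import defaultdict
--
-- def get_segment_summary(segment):
--     rows, cols = defaultdict(set), defaultdict(set)
--
--     for y, row in enumerate(segment):
--         for x, char in enumerate(row):
--             if char == '#':
--                 rows[y].add(x)
--                 cols[x].add(y)
--
--     return rows, cols
--
-- def find_vert_mirror(segment, cols):
--     for i in range(0, len(segment[0])-1):
--         has_vert = True
--         for j in range(len(segment[0])):
--             lj, rj = i-j, i+j+1
--
--             if lj < 0 or rj >= len(segment[0]):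
--                 break
--
--             if cols[lj] != cols[rj]:
--                 has_vert = False
--                 break
--
--         if has_vert:
--             return i
--     return -1
--
-- def find_hor_mirror(segment, rows):
--     for i in range(0, len(segment)-1):
--         has_hor = True
--         for j in range(len(segment)):
--             lj, rj = i-j, i+j+1
--
--             if lj < 0 or rj >= len(segment):
--                 break
--
--             if rows[lj] != rows[rj]:
--                 has_hor = False
--                 break
--
--         if has_hor:
--             return i
--     return -1
--
-- def get_smudge_vert_reflection(segment, cols):
--     for i in range(0, len(segment[0])-1):
--         total_diff = 0
--         for j in range(len(segment[0])):
--             lj, rj = i-j, i+j+1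
--
--             if lj < 0 or rj >= len(segment[0]):
--                 break
--
--             total_diff += len(cols[lj].union(cols[rj]) - cols[lj].intersection(cols[rj]))
--             if total_diff > 1:
--                 break
--
--         if total_diff == 1:
--             return i
--     return -1
--
-- def get_smudge_hor_reflection(segment, rows):
--     for i in range(0, len(segment)-1):
--         total_diff = 0
--         for j in range(len(segment)):
--             lj, rj = i-j, i+j+1
--
--             if lj < 0 or rj >= len(segment):
--                 break
--
--             total_diff += len(rows[lj].union(rows[rj]) - rows[lj].intersection(rows[rj]))
--             if total_diff > 1:
--                 break
--
--         if total_diff == 1: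
--             return i
--     return -1
--
-- def get_checksum_2(data):
--     checksum_2 = 0
--     for i, seg in enumerate(data):
--         rows, cols = get_segment_summary(seg)
--         vert = find_vert_mirror(seg, cols)
--         hor = find_hor_mirror(seg, rows)
--
--         new_vert = get_smudge_vert_reflection(seg, cols)
--         new_hor = get_smudge_hor_reflection(seg, rows)
--
--         if new_vert != -1:
--             checksum_2 += new_vert+1
--         if new_hor != -1:
--             checksum_2 += (new_hor+1)*100
--     return checksum_2
-- ===== SOURCE B (Python) =====
-- def _mask(chars):
--     m = 0
--     for x, ch in enumerate(chars):
--         if ch == '#':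
--             m |= 1 << x
--     return m
--
--
-- def _col_masks(seg, width):
--     out = []
--     for x in range(width):
--         m = 0
--         for y, row in enumerate(seg):
--             if x < len(row) and row[x] == '#':
--                 m |= 1 << y
--         out.append(m)
--     return out
--
--
-- def _smudge(masks):
--     n = len(masks)
--     bucket = [0] * (2 * n)
--     for a in range(n):
--         for b in range(a + 1, n):
--             bucket[a + b] += bin(masks[a] ^ masks[b]).count('1')
--     for i in range(n - 1):
--         if bucket[2 * i + 1] == 1:
--             return i + 1
--     return 0
--
--
-- def get_checksum_2(data):
--     total = 0
--     for seg in data: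
--         width = len(seg[0])
--         total += _smudge(_col_masks(seg, width)) + 100 * _smudge([_mask(r) for r in seg])
--     return total
-- ===== Notes on version B (the rewrite author's own statement) =====
-- stated objective: alternative
-- what changed: Instead of A's per-candidate expanding scan over a defaultdict-of-sets summary (set union/intersection/difference per mirrored pair with early break), B encodes lines as integer bitmasks, aggregates the popcount-of-XOR distance of every line pair once into buckets keyed by index sum, and reads the answer off the odd-sum buckets; A's unused part-1 mirror searches are dropped.
import Mathlib
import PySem

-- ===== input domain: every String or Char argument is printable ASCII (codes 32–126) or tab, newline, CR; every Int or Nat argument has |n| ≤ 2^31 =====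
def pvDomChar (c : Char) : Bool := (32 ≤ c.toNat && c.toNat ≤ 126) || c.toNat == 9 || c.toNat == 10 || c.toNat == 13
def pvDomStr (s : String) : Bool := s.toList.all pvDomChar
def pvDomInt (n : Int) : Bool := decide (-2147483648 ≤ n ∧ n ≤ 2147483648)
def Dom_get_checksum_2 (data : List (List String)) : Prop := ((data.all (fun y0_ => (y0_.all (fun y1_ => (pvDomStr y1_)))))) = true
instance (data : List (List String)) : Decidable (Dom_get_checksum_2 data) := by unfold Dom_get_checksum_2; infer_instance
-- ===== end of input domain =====

-- B encodes lines as integer bitmasks and aggregates popcount-of-XOR pair distances into buckets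
-- keyed by index sum (one pass over all pairs), replacing A's per-candidate set-algebra scan and
-- dropping A's unused part-1 searches (alternative algorithm, similar cost).


-- ===== PORT A =====
def pvRCChar (y : Int) (rc : PySem.Dict Int (PySem.Set Int) × PySem.Dict Int (PySem.Set Int))
    (xc : Int × Char) : PySem.Dict Int (PySem.Set Int) × PySem.Dict Int (PySem.Set Int) :=
  if xc.2 = '#' then
    (PySem.Dict.modify rc.1 y [] (fun s => PySem.Set.add s xc.1),
     PySem.Dict.modify rc.2 xc.1 [] (fun s => PySem.Set.add s y))
  else rc

def pvRCRow (rc : PySem.Dict Int (PySem.Set Int) × PySem.Dict Int (PySem.Set Int))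
    (yrow : Int × String) : PySem.Dict Int (PySem.Set Int) × PySem.Dict Int (PySem.Set Int) :=
  (PySem.List.enumerate yrow.2.toList 0).foldl (pvRCChar yrow.1) rc

def pvSegSummary (segment : List String) :
    PySem.Dict Int (PySem.Set Int) × PySem.Dict Int (PySem.Set Int) :=
  (PySem.List.enumerate segment 0).foldl pvRCRow (PySem.Dict.empty, PySem.Dict.empty)

def pvFindInner (get : Int → PySem.Set Int) (n i : Int) : List Int → Bool
  | [] => true
  | j :: js =>
    if i - j < 0 ∨ n ≤ i + j + 1 then true
    else if ¬ (PySem.Set.equal (get (i - j)) (get (i + j + 1)) = true) then false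
    else pvFindInner get n i js

def pvFindMirror (get : Int → PySem.Set Int) (n : Int) : List Int → Int
  | [] => -1
  | i :: is => if pvFindInner get n i (PySem.List.pyRange 0 n 1) then i else pvFindMirror get n is

def pvSmInner (get : Int → PySem.Set Int) (n i : Int) : List Int → Int → Int
  | [], total => total
  | j :: js, total =>
    if i - j < 0 ∨ n ≤ i + j + 1 then total
    else
      let total := total + PySem.Set.len
        (PySem.Set.diff (PySem.Set.union (get (i - j)) (get (i + j + 1)))
                        (PySem.Set.inter (get (i - j)) (get (i + j + 1))))
      if 1 < total then total else pvSmInner get n i js total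

def pvSmMirror (get : Int → PySem.Set Int) (n : Int) : List Int → Int
  | [] => -1
  | i :: is => if pvSmInner get n i (PySem.List.pyRange 0 n 1) 0 = 1 then i else pvSmMirror get n is

def get_checksum_2 (data : List (List String)) : Int :=
  data.foldl (fun acc seg =>
    let rc := pvSegSummary seg
    let w : Int := PySem.Str.len (PySem.List.pyGetD seg 0 "")
    let h : Int := PySem.List.len seg
    let _vert := pvFindMirror (fun k => PySem.Dict.getD rc.2 k []) w (PySem.List.pyRange 0 (w - 1) 1)
    let _hor := pvFindMirror (fun k => PySem.Dict.getD rc.1 k []) h (PySem.List.pyRange 0 (h - 1) 1)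
    let nv := pvSmMirror (fun k => PySem.Dict.getD rc.2 k []) w (PySem.List.pyRange 0 (w - 1) 1)
    let nh := pvSmMirror (fun k => PySem.Dict.getD rc.1 k []) h (PySem.List.pyRange 0 (h - 1) 1)
    let acc := if nv ≠ -1 then acc + (nv + 1) else acc
    if nh ≠ -1 then acc + (nh + 1) * 100 else acc) 0

-- ===== PORT B =====
def pvMask (cs : List Char) : Nat :=
  (PySem.List.enumerate cs 0).foldl (fun m xc => if xc.2 = '#' then m ||| (1 <<< xc.1.toNat) else m) 0

-- x is drawn from range(width), hence nonnegative; 'x < len(row) and row[x] == '#''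
def pvColMask (seg : List String) (x : Int) : Nat :=
  (PySem.List.enumerate seg 0).foldl (fun m yr =>
    if x < PySem.Str.len yr.2 ∧ PySem.Str.pyGet? yr.2 x = some '#' then m ||| (1 <<< yr.1.toNat)
    else m) 0

def pvColMasks (seg : List String) (width : Int) : List Nat :=
  (PySem.List.pyRange 0 width 1).map (pvColMask seg)

def pvSmSearch (bucket : List Int) : List Int → Int
  | [] => 0
  | i :: is => if bucket.getD (2 * i + 1).toNat 0 = 1 then i + 1 else pvSmSearch bucket is

-- bucket[a+b] += popcount(masks[a] ^ masks[b]); all indices are provably in range,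
-- so list get/set with default is exact here
def pvSmudge (masks : List Nat) : Int :=
  let n : Int := PySem.List.len masks
  let bucket := (PySem.List.pyRange 0 n 1).foldl (fun B a =>
      (PySem.List.pyRange (a + 1) n 1).foldl (fun B b =>
        B.set (a + b).toNat (B.getD (a + b).toNat 0 +
          (PySem.Int.bitCount (((PySem.List.pyGetD masks a 0 ^^^ PySem.List.pyGetD masks b 0 : Nat)) : Int) : Int))) B)
    (List.replicate (2 * n).toNat (0 : Int))
  pvSmSearch bucket (PySem.List.pyRange 0 (n - 1) 1)

def get_checksum_2_alt (data : List (List String)) : Int :=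
  data.foldl (fun acc seg =>
    let width : Int := PySem.Str.len (PySem.List.pyGetD seg 0 "")
    acc + pvSmudge (pvColMasks seg width) + 100 * pvSmudge (seg.map (fun r => pvMask r.toList))) 0

-- ===== PRECONDITION & SPEC =====
-- A raises IndexError (seg[0]) on a segment with no rows; Pre_ excludes exactly those inputs.
def Pre_get_checksum_2 (data : List (List String)) : Prop := ∀ seg ∈ data, seg ≠ []
instance (data : List (List String)) : Decidable (Pre_get_checksum_2 data) := by
  unfold Pre_get_checksum_2; infer_instance

def pvWitness_get_checksum_2 : List (List String) := [["#.", "#.", "##"]]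

def Spec_get_checksum_2 (data : List (List String)) (out : Int) : Prop := out = get_checksum_2_alt data
instance (data : List (List String)) (out : Int) : Decidable (Spec_get_checksum_2 data out) := by
  unfold Spec_get_checksum_2; infer_instance

-- ===== CLAIM (what is proved, stated in full; the proofs are below) =====
def Claim_equal_get_checksum_2 : Prop := ∀ (data : List (List String)), Dom_get_checksum_2 data → Pre_get_checksum_2 data → Spec_get_checksum_2 data (get_checksum_2 data)

-- ===== LEMMAS AND PROOFS =====
def pvMaskOf (l : List Int) : Nat := l.foldl (fun m e => m ||| (1 <<< e.toNat)) 0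

theorem pvMaskOf_foldl (l : List Int) : ∀ (m : Nat),
    l.foldl (fun m e => m ||| (1 <<< e.toNat)) m = m ||| pvMaskOf l := by
  induction l with
  | nil => intro m; simp [pvMaskOf]
  | cons e l ih =>
    intro m
    simp only [pvMaskOf, List.foldl_cons, Nat.zero_or] at *
    rw [ih, ih (1 <<< e.toNat), Nat.or_assoc]

theorem pvMaskOf_testBit (l : List Int) (h : ∀ e ∈ l, 0 ≤ e) (k : Nat) :
    (pvMaskOf l).testBit k = decide ((k : Int) ∈ l) := by
  induction l with
  | nil => simp [pvMaskOf]
  | cons e l ih =>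
    have he := h e (by simp)
    have hl : ∀ e ∈ l, 0 ≤ e := fun e he' => h e (by simp [he'])
    simp only [pvMaskOf, List.foldl_cons, Nat.zero_or] at *
    rw [pvMaskOf_foldl, Nat.testBit_or]
    rw [show (pvMaskOf l).testBit k = decide ((k:Int) ∈ l) from ih hl]
    have h1 : (1 <<< e.toNat) = 2 ^ e.toNat := Nat.one_shiftLeft e.toNat
    rw [h1, Nat.testBit_two_pow]
    have h3 : ((k : Int) = e) ↔ (e.toNat = k) := by omega
    simp [List.mem_cons, h3, eq_comm]

theorem pvMaskOf_lt (l : List Int) (K : Nat) (h : ∀ e ∈ l, 0 ≤ e ∧ e < (K : Int)) :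
    pvMaskOf l < 2 ^ K := by
  induction l with
  | nil => simp [pvMaskOf]
  | cons e l ih =>
    have he := h e (by simp)
    have hl := fun e he' => h e (List.mem_cons_of_mem _ he')
    simp only [pvMaskOf, List.foldl_cons, Nat.zero_or]
    rw [pvMaskOf_foldl]
    refine Nat.or_lt_two_pow ?_ (ih hl)
    rw [Nat.one_shiftLeft]
    exact Nat.pow_lt_pow_right (by omega) (by omega)

theorem pvBitCount_countP (K : Nat) : ∀ m : Nat, m < 2 ^ K →
    PySem.Int.bitCount (m : Int) = (List.range K).countP (fun k => m.testBit k) := by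
  induction K with
  | zero =>
    intro m hm
    interval_cases m
    simp [PySem.Int.bitCount_zero]
  | succ K ih =>
    intro m hm
    rcases Nat.eq_zero_or_pos m with h0 | hpos
    · subst h0; simp [PySem.Int.bitCount_zero]
    · rw [PySem.Int.bitCount_natCast hpos, ih (m / 2) (by omega),
        List.range_succ_eq_map, List.countP_cons, List.countP_map]
      have h2 : List.countP ((fun k => m.testBit k) ∘ Nat.succ) (List.range K)
          = List.countP (fun k => (m / 2).testBit k) (List.range K) := by
        apply List.countP_congr
        intro k _
        simp [Function.comp, Nat.testBit_succ]
      rw [h2]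
      simp only [Nat.testBit_zero]
      have := Nat.mod_two_eq_zero_or_one m
      rcases this with h | h <;> simp [h] <;> omega

theorem pvCountP_or (l : List Nat) (p q : Nat → Bool) (h : ∀ a, ¬(p a = true ∧ q a = true)) :
    l.countP (fun a => p a || q a) = l.countP p + l.countP q := by
  induction l with
  | nil => simp
  | cons a l ih =>
    simp only [List.countP_cons, ih]
    by_cases hp : p a = true
    · have hq : ¬ q a = true := fun hq => h a ⟨hp, hq⟩
      simp [hp, hq]; omega
    · by_cases hq : q a = true <;> simp [hp, hq] <;> omega

theorem pvCountP_mem_length (D : List Int) (K : Nat) (hnd : D.Nodup)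
    (hb : ∀ e ∈ D, 0 ≤ e ∧ e < (K : Int)) :
    (List.range K).countP (fun k : Nat => decide ((k : Int) ∈ D)) = D.length := by
  induction D with
  | nil => simp
  | cons e D ih =>
    have he := hb e (by simp)
    have hD := fun e' he' => hb e' (List.mem_cons_of_mem _ he')
    have hnotin : e ∉ D := (List.nodup_cons.mp hnd).1
    have hsplit : (List.range K).countP (fun k : Nat => decide ((k : Int) ∈ e :: D))
        = (List.range K).countP (fun k => (k == e.toNat) || decide ((k : Int) ∈ D)) := by
      apply List.countP_congr
      intro k _
      have : ((k : Int) = e) ↔ (k = e.toNat) := by omega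
      simp [List.mem_cons, this]
    rw [hsplit, pvCountP_or]
    · have h1 : (List.range K).countP (fun k => k == e.toNat) = 1 := by
        rw [show (List.range K).countP (fun k => k == e.toNat) = (List.range K).count e.toNat from rfl]
        rw [List.count_range]
        simp; omega
      rw [h1, ih (List.nodup_cons.mp hnd).2 hD]
      simp [List.length_cons]; omega
    · rintro a ⟨h1, h2⟩
      have ha : a = e.toNat := by simpa using h1
      have ha2 : (a : Int) = e := by omega
      rw [ha2] at h2
      exact hnotin (by simpa using h2)

def pvDC (s t : PySem.Set Int) : Int :=
  PySem.Set.len (PySem.Set.diff (PySem.Set.union s t) (PySem.Set.inter s t))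

theorem pvDC_eq_bitCount (s t : List Int) (K : Nat)
    (hs : s.Nodup) (_ht : t.Nodup)
    (hbs : ∀ e ∈ s, 0 ≤ e ∧ e < (K : Int)) (hbt : ∀ e ∈ t, 0 ≤ e ∧ e < (K : Int)) :
    pvDC s t = (PySem.Int.bitCount ((pvMaskOf s ^^^ pvMaskOf t : Nat) : Int) : Int) := by
  set D := PySem.Set.diff (PySem.Set.union s t) (PySem.Set.inter s t) with hD
  have hndD : D.Nodup := PySem.Set.nodup_diff _ _ (PySem.Set.nodup_union s t hs)
  have hmemD : ∀ e : Int, e ∈ D ↔ ((e ∈ s ∨ e ∈ t) ∧ ¬(e ∈ s ∧ e ∈ t)) := by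
    intro e
    rw [hD, PySem.Set.mem_diff, PySem.Set.mem_union, PySem.Set.mem_inter]
  have hbD : ∀ e ∈ D, 0 ≤ e ∧ e < (K : Int) := by
    intro e he
    rcases ((hmemD e).mp he).1 with h | h
    · exact hbs e h
    · exact hbt e h
  have hlt : (pvMaskOf s ^^^ pvMaskOf t) < 2 ^ K :=
    Nat.xor_lt_two_pow (pvMaskOf_lt s K hbs) (pvMaskOf_lt t K hbt)
  rw [pvBitCount_countP K _ hlt]
  have hcong : (List.range K).countP (fun k => (pvMaskOf s ^^^ pvMaskOf t).testBit k)
      = (List.range K).countP (fun k : Nat => decide ((k : Int) ∈ D)) := by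
    apply List.countP_congr
    intro k _
    rw [Nat.testBit_xor, pvMaskOf_testBit s (fun e he => (hbs e he).1) k,
      pvMaskOf_testBit t (fun e he => (hbt e he).1) k]
    by_cases h1 : (k : Int) ∈ s <;> by_cases h2 : (k : Int) ∈ t <;>
      simp [h1, h2, hmemD]
  rw [hcong, pvCountP_mem_length D K hndD hbD]
  simp [pvDC, ← hD, PySem.Set.len]

def pvHxs (cs : List Char) (t : Int) : List Int :=
  ((PySem.List.enumerate cs t).filter (fun p => p.2 == '#')).map (·.1)

def pvColL (seg : List String) (s : Int) (x : Nat) : List Int :=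
  ((PySem.List.enumerate seg s).filter (fun p => p.2.toList[x]? == some '#')).map (·.1)

theorem pvFstMap_nodup {α : Type} (l : List (Int × α)) (q : Int × α → Bool)
    (h : l.Pairwise (fun p q => p.1 < q.1)) : ((l.filter q).map (·.1)).Nodup := by
  have h1 : (l.filter q).Pairwise (fun p q => p.1 < q.1) := List.Pairwise.filter q h
  have h2 : ((l.filter q).map (·.1)).Pairwise (· < ·) := List.pairwise_map.mpr h1
  exact List.Pairwise.imp (fun hlt => ne_of_lt hlt) h2

theorem pvHxs_nodup (cs : List Char) (t : Int) : (pvHxs cs t).Nodup :=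
  pvFstMap_nodup _ _ (PySem.List.pairwise_lt_enumerate cs t)

theorem pvColL_nodup (seg : List String) (s : Int) (x : Nat) : (pvColL seg s x).Nodup :=
  pvFstMap_nodup _ _ (PySem.List.pairwise_lt_enumerate seg s)

theorem pvHxs_bounds (cs : List Char) (e : Int) (he : e ∈ pvHxs cs 0) :
    0 ≤ e ∧ e < (cs.length : Int) := by
  simp only [pvHxs, List.mem_map, List.mem_filter] at he
  obtain ⟨p, ⟨hmem, _⟩, hfst⟩ := he
  rw [PySem.List.mem_enumerate_iff] at hmem
  obtain ⟨k, hk, rfl⟩ := hmem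
  simp at hfst ⊢
  omega

theorem pvColL_bounds (seg : List String) (x : Nat) (e : Int) (he : e ∈ pvColL seg 0 x) :
    0 ≤ e ∧ e < (seg.length : Int) := by
  simp only [pvColL, List.mem_map, List.mem_filter] at he
  obtain ⟨p, ⟨hmem, _⟩, hfst⟩ := he
  rw [PySem.List.mem_enumerate_iff] at hmem
  obtain ⟨k, hk, rfl⟩ := hmem
  simp at hfst ⊢
  omega

theorem pvHxs_cons (c : Char) (cs : List Char) (t : Int) :
    pvHxs (c :: cs) t = if c = '#' then t :: pvHxs cs (t + 1) else pvHxs cs (t + 1) := by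
  simp only [pvHxs, PySem.List.enumerate_cons, List.filter_cons]
  by_cases h : c = '#' <;> simp [h]

theorem pvColL_cons (row : String) (r : List String) (s : Int) (x : Nat) :
    pvColL (row :: r) s x =
      if row.toList[x]? = some '#' then s :: pvColL r (s + 1) x else pvColL r (s + 1) x := by
  simp only [pvColL, PySem.List.enumerate_cons, List.filter_cons]
  by_cases h : row.toList[x]? = some '#' <;> simp [h]

theorem pvMaskOf_cons (e : Int) (l : List Int) :
    pvMaskOf (e :: l) = (1 <<< e.toNat) ||| pvMaskOf l := by
  simp only [pvMaskOf, List.foldl_cons, Nat.zero_or]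
  exact pvMaskOf_foldl l _

theorem pvMask_fold (cs : List Char) : ∀ (t : Int) (m : Nat),
    (PySem.List.enumerate cs t).foldl (fun m xc => if xc.2 = '#' then m ||| (1 <<< xc.1.toNat) else m) m
      = m ||| pvMaskOf (pvHxs cs t) := by
  induction cs with
  | nil => intro t m; simp [pvHxs, pvMaskOf, PySem.List.enumerate_nil]
  | cons c cs ih =>
    intro t m
    rw [PySem.List.enumerate_cons, List.foldl_cons, pvHxs_cons]
    by_cases h : c = '#'
    · simp only [h, if_true]
      rw [ih, pvMaskOf_cons, Nat.or_assoc]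
    · simp only [if_neg h]
      rw [ih]

theorem pvMask_eq (cs : List Char) : pvMask cs = pvMaskOf (pvHxs cs 0) := by
  rw [pvMask, pvMask_fold]
  simp

theorem pvColMask_fold (x : Nat) (seg : List String) : ∀ (t : Int) (m : Nat),
    (PySem.List.enumerate seg t).foldl (fun m yr =>
      if ((x : Int)) < PySem.Str.len yr.2 ∧ PySem.Str.pyGet? yr.2 ((x : Int)) = some '#'
      then m ||| (1 <<< yr.1.toNat) else m) m
      = m ||| pvMaskOf (pvColL seg t x) := by
  induction seg with
  | nil => intro t m; simp [pvColL, pvMaskOf, PySem.List.enumerate_nil]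
  | cons row r ih =>
    intro t m
    rw [PySem.List.enumerate_cons, List.foldl_cons, pvColL_cons]
    have hcond : (((x : Int)) < PySem.Str.len row ∧ PySem.Str.pyGet? row ((x : Int)) = some '#')
        ↔ row.toList[x]? = some '#' := by
      rw [PySem.Str.pyGet?_eq, PySem.Chars.pyGet?_eq_listPyGet?, PySem.List.pyGet?_natCast,
        PySem.Str.len_eq]
      constructor
      · exact fun h => h.2
      · intro h
        refine ⟨?_, h⟩
        have hlt := (List.getElem?_eq_some_iff.mp h).1
        omega
    by_cases h : row.toList[x]? = some '#'
    · rw [if_pos (hcond.mpr h), if_pos h, ih, pvMaskOf_cons, Nat.or_assoc]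
    · rw [if_neg (fun hc => h (hcond.mp hc)), if_neg h, ih]

theorem pvColMask_eq (seg : List String) (x : Nat) :
    pvColMask seg ((x : Int)) = pvMaskOf (pvColL seg 0 x) := by
  rw [pvColMask, pvColMask_fold]
  simp

theorem pvColMasks_length (seg : List String) (width : Int) (_h0 : 0 ≤ width) :
    (pvColMasks seg width).length = width.toNat := by
  simp [pvColMasks, PySem.List.length_pyRange_one]

theorem pvColMasks_getD (seg : List String) (width : Int) (k : Nat) (hk : k < width.toNat) :
    (pvColMasks seg width).getD k 0 = pvMaskOf (pvColL seg 0 k) := by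
  have hlen : k < (pvColMasks seg width).length := by
    rw [pvColMasks_length seg width (by omega)]; exact hk
  rw [List.getD_eq_getElem _ _ hlen]
  simp only [pvColMasks, List.getElem_map]
  rw [PySem.List.getElem_pyRange_one]
  simpa using pvColMask_eq seg k

theorem pvIR1 (y : Int) (cs : List Char) : ∀ (t : Int) (rc : _ × _),
    ((PySem.List.enumerate cs t).foldl (pvRCChar y) rc).1.getD y [] =
      PySem.Set.update (rc.1.getD y []) (pvHxs cs t) := by
  induction cs with
  | nil => intro t rc; simp [PySem.List.enumerate_nil, pvHxs, PySem.Set.update]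
  | cons c cs ih =>
    intro t rc
    rw [PySem.List.enumerate_cons, List.foldl_cons, pvHxs_cons]
    by_cases hc : c = '#'
    · rw [if_pos hc, ih]
      have : (pvRCChar y rc ((t, c))).1.getD y [] = PySem.Set.add (rc.1.getD y []) t := by
        unfold pvRCChar
        rw [if_pos hc]
        simp [PySem.Dict.getD_modify_self]
      rw [this]
      simp [PySem.Set.update]
    · rw [if_neg hc, ih]
      unfold pvRCChar
      rw [if_neg hc]

-- the inner fold leaves other rows-dict keys alone
theorem pvIR2 (y : Int) (cs : List Char) : ∀ (t : Int) (rc : _ × _) (k : Int), k ≠ y →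
    ((PySem.List.enumerate cs t).foldl (pvRCChar y) rc).1.getD k [] = rc.1.getD k [] := by
  induction cs with
  | nil => intro t rc k _; simp [PySem.List.enumerate_nil]
  | cons c cs ih =>
    intro t rc k hk
    rw [PySem.List.enumerate_cons, List.foldl_cons, ih _ _ _ hk]
    unfold pvRCChar
    split
    · simp [PySem.Dict.getD_modify, hk]
    · rfl

-- the inner fold, cols dict at key x
theorem pvIR3 (y : Int) (x : Nat) (cs : List Char) : ∀ (t : Nat) (rc : _ × _),
    ((PySem.List.enumerate cs (t : Int)).foldl (pvRCChar y) rc).2.getD (x : Int) [] =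
      if t ≤ x ∧ cs[x - t]? = some '#' then PySem.Set.add (rc.2.getD (x : Int) []) y
      else rc.2.getD (x : Int) [] := by
  induction cs with
  | nil => intro t rc; simp [PySem.List.enumerate_nil]
  | cons c cs ih =>
    intro t rc
    rw [PySem.List.enumerate_cons, List.foldl_cons]
    have hcast : ((t : Int) + 1) = ((t + 1 : Nat) : Int) := by push_cast; ring
    by_cases hxt : x = t
    · subst hxt
      by_cases hc : c = '#'
      · have hstep : (pvRCChar y rc ((x : Int), c)).2.getD (x : Int) [] =
            PySem.Set.add (rc.2.getD (x : Int) []) y := by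
          unfold pvRCChar
          rw [if_pos hc]
          simp [PySem.Dict.getD_modify_self]
        rw [hcast, ih, if_neg (by omega), hstep, if_pos ⟨le_refl x, by simp [hc]⟩]
      · have hstep : (pvRCChar y rc ((x : Int), c)) = rc := by
          unfold pvRCChar; rw [if_neg hc]
        rw [hcast, ih, if_neg (by omega), hstep, if_neg (by simp [hc])]
    · have hstep : (pvRCChar y rc ((t : Int), c)).2.getD (x : Int) [] = rc.2.getD (x : Int) [] := by
        unfold pvRCChar
        split
        · simp [PySem.Dict.getD_modify, show (x : Int) ≠ (t : Int) by omega]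
        · rfl
      rw [hcast, ih, hstep]
      by_cases hle : t ≤ x
      · have h2 : x - t = (x - (t+1)) + 1 := by omega
        rw [h2, List.getElem?_cons_succ]
        have h3 : (t + 1 ≤ x) = (t ≤ x) := by simp; omega
        simp only [h3]
      · rw [if_neg (by omega), if_neg (by omega)]

-- outer fold leaves rows-dict keys below the start index alone
theorem pvOFrame (seg : List String) : ∀ (s : Int) (rc : _ × _) (k : Int), k < s →
    ((PySem.List.enumerate seg s).foldl pvRCRow rc).1.getD k [] = rc.1.getD k [] := by
  induction seg with
  | nil => intro s rc k _; simp [PySem.List.enumerate_nil]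
  | cons r seg ih =>
    intro s rc k hk
    rw [PySem.List.enumerate_cons, List.foldl_cons, ih _ _ _ (by omega)]
    exact pvIR2 s r.toList 0 rc k (by omega)

-- rows dict of the summary: row y holds the '#' positions of row y
theorem pvOA1 (seg : List String) : ∀ (sN : Nat) (rc : _ × _),
    (∀ k : Int, (sN : Int) ≤ k → rc.1.getD k [] = []) → ∀ (y : Nat), sN ≤ y →
    ((PySem.List.enumerate seg (sN : Int)).foldl pvRCRow rc).1.getD (y : Int) [] =
      (match seg[y - sN]? with | some r => pvHxs r.toList 0 | none => []) := by
  induction seg with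
  | nil =>
    intro sN rc hr y hy
    simp [PySem.List.enumerate_nil]
    exact hr _ (by omega)
  | cons r seg ih =>
    intro sN rc hr y hy
    rw [PySem.List.enumerate_cons, List.foldl_cons]
    have hcast : ((sN : Int) + 1) = ((sN + 1 : Nat) : Int) := by push_cast; ring
    by_cases hys : y = sN
    · subst hys
      have hrow : (pvRCRow rc ((y : Int), r)).1.getD (y : Int) [] = pvHxs r.toList 0 := by
        unfold pvRCRow
        rw [pvIR1, hr _ (le_refl _)]
        have hnd := pvHxs_nodup r.toList 0
        calc PySem.Set.update ([] : PySem.Set Int) (pvHxs r.toList 0)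
            = PySem.Set.ofList (pvHxs r.toList 0) := rfl
          _ = pvHxs r.toList 0 := PySem.Set.ofList_eq_self_of_nodup _ hnd
      rw [hcast, pvOFrame seg _ _ _ (by omega), hrow]
      simp
    · have hy1 : sN + 1 ≤ y := by omega
      have hrnew : ∀ k : Int, ((sN + 1 : Nat) : Int) ≤ k → (pvRCRow rc ((sN : Int), r)).1.getD k [] = [] := by
        intro k hk
        unfold pvRCRow
        rw [pvIR2 _ _ _ _ _ (by omega)]
        exact hr _ (by omega)
      rw [hcast, ih (sN + 1) _ hrnew y hy1]
      have : y - sN = (y - (sN + 1)) + 1 := by omega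
      rw [this, List.getElem?_cons_succ]

-- cols dict of the summary: column x accumulates the rows with '#' at x
theorem pvOA2 (seg : List String) : ∀ (sN : Nat) (rc : _ × _) (x : Nat),
    (∀ e ∈ rc.2.getD (x : Int) [], e < (sN : Int)) →
    ((PySem.List.enumerate seg (sN : Int)).foldl pvRCRow rc).2.getD (x : Int) [] =
      rc.2.getD (x : Int) [] ++ pvColL seg (sN : Int) x := by
  induction seg with
  | nil => intro sN rc x _; simp [PySem.List.enumerate_nil, pvColL]
  | cons r seg ih =>
    intro sN rc x hc
    rw [PySem.List.enumerate_cons, List.foldl_cons]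
    have hcast : ((sN : Int) + 1) = ((sN + 1 : Nat) : Int) := by push_cast; ring
    have hrow : (pvRCRow rc ((sN : Int), r)).2.getD (x : Int) [] =
        if r.toList[x]? = some '#' then rc.2.getD (x : Int) [] ++ [(sN : Int)]
        else rc.2.getD (x : Int) [] := by
      unfold pvRCRow
      rw [show ((0:Int)) = ((0:Nat):Int) by simp]
      rw [pvIR3 (sN : Int) x r.toList 0 rc]
      simp only [Nat.zero_le, Nat.sub_zero, true_and]
      by_cases h : r.toList[x]? = some '#'
      · rw [if_pos h, if_pos h]
        have hnotin : ((sN : Int)) ∉ rc.2.getD (x : Int) [] := fun hmem => by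
          have := hc _ hmem; omega
        simp [PySem.Set.add, PySem.Set.contains, hnotin]
      · rw [if_neg h, if_neg h]
    have hcnew : ∀ e ∈ (pvRCRow rc ((sN : Int), r)).2.getD (x : Int) [], e < ((sN + 1 : Nat) : Int) := by
      intro e he
      rw [hrow] at he
      split at he
      · rcases List.mem_append.mp he with h | h
        · have := hc _ h; omega
        · simp at h; omega
      · have := hc _ he; omega
    rw [hcast, ih (sN + 1) _ x hcnew, hrow, pvColL_cons, ← hcast]
    by_cases h : r.toList[x]? = some '#'
    · rw [if_pos h, if_pos h]
      simp
    · rw [if_neg h, if_neg h]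

theorem pvRows_getD (seg : List String) (y : Nat) :
    (pvSegSummary seg).1.getD (y : Int) [] =
      (match seg[y]? with | some r => pvHxs r.toList 0 | none => []) := by
  unfold pvSegSummary
  rw [show ((0:Int)) = ((0:Nat):Int) by simp]
  rw [pvOA1 seg 0 _ (fun k _ => by simp [PySem.Dict.getD_empty]) y (Nat.zero_le y)]
  simp

theorem pvCols_getD (seg : List String) (x : Nat) :
    (pvSegSummary seg).2.getD (x : Int) [] = pvColL seg 0 x := by
  unfold pvSegSummary
  rw [show ((0:Int)) = ((0:Nat):Int) by simp]
  rw [pvOA2 seg 0 _ x (fun e he => by simp [PySem.Dict.getD_empty] at he)]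
  simp [PySem.Dict.getD_empty]

def pvLoop : List Int → Int → Int
  | [], total => total
  | d :: ds, total =>
    let total := total + d
    if 1 < total then total else pvLoop ds total

theorem pvSmInner_loop (get : Int → PySem.Set Int) (n i : Int) (iN : Nat) (hi : i = (iN : Int))
    (hin : i < n - 1) (_h0 : 0 ≤ i) :
    ∀ (fuel j0 : Nat), j0 + fuel = min (iN + 1) ((n - i - 1).toNat) → ∀ (t : Int),
    pvSmInner get n i (PySem.List.pyRange ((j0 : Int)) n 1) t =
      pvLoop ((List.range' j0 fuel).map
        (fun j : Nat => pvDC (get (i - (j : Int))) (get (i + (j : Int) + 1)))) t := by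
  intro fuel
  induction fuel with
  | zero =>
    intro j0 hj t
    have hj0n : ((j0 : Int)) < n := by omega
    rw [PySem.List.pyRange_one_cons hj0n]
    simp only [pvSmInner, List.range', List.map_nil, pvLoop]
    rw [if_pos (by omega)]
  | succ fuel ih =>
    intro j0 hj t
    have hj0n : ((j0 : Int)) < n := by omega
    rw [PySem.List.pyRange_one_cons hj0n]
    have hrange : List.range' j0 (fuel + 1) = j0 :: List.range' (j0 + 1) fuel := by
      simp [List.range'_succ]
    rw [hrange]
    simp only [pvSmInner, List.map_cons, pvLoop]
    rw [if_neg (by omega)]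
    simp only [pvDC]
    split
    · rfl
    · rw [show ((j0 : Int)) + 1 = (((j0 + 1 : Nat)) : Int) by push_cast; ring]
      exact ih (j0 + 1) (by omega) _

-- popcount distance of two stored masks: what B adds to a bucket
def pvD (masks : List Nat) (a b : Nat) : Int :=
  (PySem.Int.bitCount ((masks.getD a 0 ^^^ masks.getD b 0 : Nat) : Int) : Int)

theorem pvD_nonneg (masks : List Nat) (a b : Nat) : 0 ≤ pvD masks a b :=
  Int.natCast_nonneg _

theorem pvLoop_one_iff (ds : List Int) (h : ∀ d ∈ ds, 0 ≤ d) : ∀ t : Int,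
    (pvLoop ds t = 1 ↔ t + ds.sum = 1) := by
  induction ds with
  | nil => intro t; simp [pvLoop]
  | cons d ds ih =>
    intro t
    have hd : 0 ≤ d := h d (by simp)
    have hsum : 0 ≤ ds.sum := List.sum_nonneg (fun x hx => h x (by simp [hx]))
    simp only [pvLoop, List.sum_cons]
    split
    · constructor
      · intro h1; omega
      · intro h1; omega
    · rw [ih (fun x hx => h x (by simp [hx]))]
      constructor <;> intro h1 <;> omega

-- A's inner scan at center i equals the truncating fold over the mirrored-pair distances
theorem pvSmInner_eq (get : Int → PySem.Set Int) (masks : List Nat) (N K : Nat)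
    (hget : ∀ k : Nat, k < N → (get ((k : Nat) : Int)).Nodup ∧
      (∀ e ∈ get ((k : Nat) : Int), 0 ≤ e ∧ e < (K : Int)) ∧
      masks.getD k 0 = pvMaskOf (get ((k : Nat) : Int)))
    (iN : Nat) (hi : iN + 2 ≤ N) :
    pvSmInner get ((N : Nat) : Int) ((iN : Nat) : Int) (PySem.List.pyRange 0 ((N : Nat) : Int) 1) 0 =
      pvLoop ((List.range (min (iN + 1) (N - 1 - iN))).map
        (fun j => pvD masks (iN - j) (iN + j + 1))) 0 := by
  have hm : min (iN + 1) ((((N : Nat) : Int) - ((iN : Nat) : Int) - 1).toNat)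
      = min (iN + 1) (N - 1 - iN) := by omega
  rw [show ((0 : Int)) = (((0 : Nat)) : Int) by simp]
  rw [pvSmInner_loop get ((N : Nat) : Int) ((iN : Nat) : Int) iN rfl (by omega) (by omega)
    (min (iN + 1) (N - 1 - iN)) 0 (by omega)]
  congr 1
  rw [show List.range' 0 (min (iN + 1) (N - 1 - iN)) = List.range (min (iN + 1) (N - 1 - iN)) from
    List.range_eq_range'.symm]
  apply List.map_congr_left
  intro j hj
  rw [List.mem_range] at hj
  have hj1 : j ≤ iN := by omega
  have hj2 : iN + j + 1 < N := by omega
  have hc1 : ((iN : Nat) : Int) - ((j : Nat) : Int) = (((iN - j : Nat)) : Int) := by omega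
  have hc2 : ((iN : Nat) : Int) + ((j : Nat) : Int) + 1 = (((iN + j + 1 : Nat)) : Int) := by omega
  obtain ⟨hnd1, hb1, hm1⟩ := hget (iN - j) (by omega)
  obtain ⟨hnd2, hb2, hm2⟩ := hget (iN + j + 1) (by omega)
  rw [hc1, hc2, pvDC_eq_bitCount _ _ K hnd1 hnd2 hb1 hb2, pvD, hm1, hm2]

-- B's bucket update
def pvStep (masks : List Nat) (B : List Int) (a b : Nat) : List Int :=
  B.set (a + b) (B.getD (a + b) 0 + pvD masks a b)

theorem pvStep_length (masks : List Nat) (B : List Int) (a b : Nat) :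
    (pvStep masks B a b).length = B.length := List.length_set ..

theorem pvStep_getD_ne (masks : List Nat) (B : List Int) (a b s : Nat) (h : a + b ≠ s) :
    (pvStep masks B a b).getD s 0 = B.getD s 0 := by
  rw [pvStep, List.getD_eq_getElem?_getD, List.getElem?_set_ne h, ← List.getD_eq_getElem?_getD]

theorem pvStep_getD_self (masks : List Nat) (B : List Int) (a b s : Nat) (h : a + b = s)
    (hs : s < B.length) :
    (pvStep masks B a b).getD s 0 = B.getD s 0 + pvD masks a b := by
  subst h
  rw [pvStep, List.getD_eq_getElem?_getD, List.getElem?_set_self hs, Option.getD_some]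

theorem pvBucketInner (masks : List Nat) (a s : Nat) : ∀ (bs : List Nat) (B : List Int),
    s < B.length →
    ((bs.foldl (fun B b => pvStep masks B a b) B).getD s 0
        = B.getD s 0 + ((bs.filter (fun b => decide (a + b = s))).map (fun b => pvD masks a b)).sum)
    ∧ (bs.foldl (fun B b => pvStep masks B a b) B).length = B.length := by
  intro bs
  induction bs with
  | nil => intro B hs; simp
  | cons b bs ih =>
    intro B hs
    rw [List.foldl_cons, List.filter_cons]
    have hlen : (pvStep masks B a b).length = B.length := pvStep_length ..
    obtain ⟨ih1, ih2⟩ := ih (pvStep masks B a b) (by omega)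
    constructor
    · rw [ih1]
      by_cases h : a + b = s
      · rw [pvStep_getD_self masks B a b s h hs]
        simp [h]
        omega
      · rw [pvStep_getD_ne masks B a b s h]
        simp [h]
    · rw [ih2, hlen]

theorem pvBucketOuter (masks : List Nat) (s : Nat) (f : Nat → List Nat) :
    ∀ (as_ : List Nat) (B : List Int), s < B.length →
    ((as_.foldl (fun B a => (f a).foldl (fun B b => pvStep masks B a b) B) B).getD s 0
        = B.getD s 0 + (as_.map (fun a =>
            (((f a).filter (fun b => decide (a + b = s))).map (fun b => pvD masks a b)).sum)).sum)
    ∧ (as_.foldl (fun B a => (f a).foldl (fun B b => pvStep masks B a b) B) B).length = B.length := by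
  intro as_
  induction as_ with
  | nil => intro B hs; simp
  | cons a as_ ih =>
    intro B hs
    rw [List.foldl_cons]
    obtain ⟨in1, in2⟩ := pvBucketInner masks a s (f a) B hs
    obtain ⟨ih1, ih2⟩ := ih ((f a).foldl (fun B b => pvStep masks B a b) B) (by omega)
    constructor
    · rw [ih1, in1, List.map_cons, List.sum_cons]
      omega
    · rw [ih2, in2]

theorem pvFilterRange (c s : Nat) : ∀ (L : Nat),
    (List.range L).filter (fun k => decide (c + k = s)) =
      if c ≤ s ∧ s < c + L then [s - c] else [] := by
  intro L
  induction L with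
  | zero => rw [if_neg (by omega)]; simp
  | succ L ih =>
    rw [List.range_succ, List.filter_append, ih]
    by_cases h : c + L = s
    · rw [if_neg (by omega), if_pos (by omega)]
      simp [h]
      omega
    · have : (List.filter (fun k => decide (c + k = s)) [L]) = [] := by simp; omega
      rw [this, List.append_nil]
      by_cases h2 : c ≤ s ∧ s < c + L
      · rw [if_pos h2, if_pos (by omega)]
      · rw [if_neg h2, if_neg (by omega)]

theorem pvListSumRange (g : Nat → Int) (n : Nat) :
    ((List.range n).map g).sum = ∑ j ∈ Finset.range n, g j := rfl

theorem pvSumWindow (f : Nat → Int) (lo len N : Nat) (h : lo + len ≤ N) :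
    ((List.range N).map (fun a => if lo ≤ a ∧ a < lo + len then f a else 0)).sum
      = ((List.range len).map (fun j => f (lo + j))).sum := by
  rw [pvListSumRange, pvListSumRange]
  have h1 : ∑ a ∈ Finset.range N, (if lo ≤ a ∧ a < lo + len then f a else 0)
      = ∑ a ∈ Finset.range N, (if a ∈ Finset.Ico lo (lo + len) then f a else 0) := by
    apply Finset.sum_congr rfl
    intro a _
    exact if_congr (by simp [Finset.mem_Ico]) rfl rfl
  rw [h1, Finset.sum_ite_mem]
  have h2 : Finset.range N ∩ Finset.Ico lo (lo + len) = Finset.Ico lo (lo + len) := by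
    apply Finset.inter_eq_right.mpr
    intro a ha
    simp only [Finset.mem_Ico] at ha
    simp only [Finset.mem_range]
    omega
  rw [h2, Finset.sum_Ico_eq_sum_range]
  simp

-- the bucket at an odd index 2i+1 holds exactly the mirrored-pair distance sum at center i
theorem pvBucketCenter (masks : List Nat) (N : Nat) (i : Nat) (hi : i + 2 ≤ N) :
    ((List.range N).map (fun a =>
        if 2 * a + 1 ≤ 2 * i + 1 ∧ 2 * i + 1 < a + N then pvD masks a (2 * i + 1 - a) else 0)).sum
      = ((List.range (min (i + 1) (N - 1 - i))).map (fun j => pvD masks (i - j) (i + j + 1))).sum := by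
  set m := min (i + 1) (N - 1 - i) with hm
  set lo := 2 * i + 2 - N with hlo
  have hlom : lo + m = i + 1 := by omega
  have hloN : lo + m ≤ N := by omega
  have hcong : (List.range N).map (fun a =>
        if 2 * a + 1 ≤ 2 * i + 1 ∧ 2 * i + 1 < a + N then pvD masks a (2 * i + 1 - a) else 0)
      = (List.range N).map (fun a =>
        if lo ≤ a ∧ a < lo + m then pvD masks a (2 * i + 1 - a) else 0) := by
    apply List.map_congr_left
    intro a ha
    rw [List.mem_range] at ha
    by_cases h : lo ≤ a ∧ a < lo + m
    · rw [if_pos h, if_pos (by omega)]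
    · rw [if_neg h, if_neg (by omega)]
  rw [hcong, pvSumWindow (fun a => pvD masks a (2 * i + 1 - a)) lo m N hloN,
    pvListSumRange, pvListSumRange, ← Finset.sum_range_reflect]
  apply Finset.sum_congr rfl
  intro j hj
  rw [Finset.mem_range] at hj
  rw [show lo + (m - 1 - j) = i - j from by omega,
    show 2 * i + 1 - (i - j) = i + j + 1 from by omega]

-- B's bucket-building double fold, in terms of pvStep over Nat indices
theorem pvBucket (masks : List Nat) (s : Nat) (hs : s < 2 * masks.length) :
    ((PySem.List.pyRange 0 (PySem.List.len masks) 1).foldl (fun B a =>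
        (PySem.List.pyRange (a + 1) (PySem.List.len masks) 1).foldl (fun B b =>
          B.set (a + b).toNat (B.getD (a + b).toNat 0 +
            (PySem.Int.bitCount (((PySem.List.pyGetD masks a 0 ^^^ PySem.List.pyGetD masks b 0 : Nat)) : Int) : Int))) B)
      (List.replicate (2 * PySem.List.len masks).toNat (0 : Int))).getD s 0
    = ((List.range masks.length).map (fun a =>
        if 2 * a + 1 ≤ s ∧ s < a + masks.length then pvD masks a (s - a) else 0)).sum := by
  set N := masks.length with hN
  have hlen : PySem.List.len masks = ((N : Nat) : Int) := PySem.List.len_eq masks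
  rw [hlen, PySem.List.pyRange_one]
  simp only [Int.sub_zero, Int.toNat_natCast, zero_add]
  rw [List.foldl_map]
  have hrep : (2 * ((N : Nat) : Int)).toNat = 2 * N := by omega
  rw [hrep]
  have hbody : ∀ (B : List Int) (aN : Nat), aN ∈ List.range N →
      (PySem.List.pyRange (((aN : Nat) : Int) + 1) ((N : Nat) : Int) 1).foldl (fun B b =>
          B.set (((aN : Nat) : Int) + b).toNat (B.getD (((aN : Nat) : Int) + b).toNat 0 +
            (PySem.Int.bitCount (((PySem.List.pyGetD masks ((aN : Nat) : Int) 0 ^^^ PySem.List.pyGetD masks b 0 : Nat)) : Int) : Int))) B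
        = ((List.range (N - (aN + 1))).map (fun k => aN + 1 + k)).foldl
            (fun B b => pvStep masks B aN b) B := by
    intro B aN _
    rw [PySem.List.pyRange_one]
    have h1 : (((N : Nat) : Int) - (((aN : Nat) : Int) + 1)).toNat = N - (aN + 1) := by omega
    rw [h1, List.foldl_map, List.foldl_map]
    apply List.foldl_ext
    intro B' k hk
    dsimp only
    have e0 : ((aN : Nat) : Int) + 1 + ((k : Nat) : Int) = (((aN + 1 + k : Nat)) : Int) := by
      push_cast; ring
    have e1 : (((aN : Nat) : Int) + (((aN : Nat) : Int) + 1 + ((k : Nat) : Int))).toNat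
        = aN + (aN + 1 + k) := by omega
    rw [e1, e0, PySem.List.pyGetD_natCast, PySem.List.pyGetD_natCast]
    rfl
  rw [List.foldl_ext _ _ _ hbody]
  obtain ⟨h1, _⟩ := pvBucketOuter masks s (fun aN => (List.range (N - (aN + 1))).map (fun k => aN + 1 + k))
    (List.range N) (List.replicate (2 * N) (0 : Int)) (by simpa using hs)
  rw [h1]
  have hrep0 : (List.replicate (2 * N) (0 : Int)).getD s 0 = 0 := by
    rw [List.getD_eq_getElem?_getD, List.getElem?_replicate]
    split <;> simp
  rw [hrep0, zero_add]
  congr 1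
  apply List.map_congr_left
  intro a ha
  rw [List.mem_range] at ha
  rw [List.filter_map]
  have hfc : (List.range (N - (a + 1))).filter ((fun b => decide (a + b = s)) ∘ (fun k => a + 1 + k))
      = (List.range (N - (a + 1))).filter (fun k => decide (2 * a + 1 + k = s)) := by
    apply List.filter_congr
    intro k _
    simp only [Function.comp_apply]
    exact decide_eq_decide.mpr (by omega)
  rw [hfc, pvFilterRange (2 * a + 1) s (N - (a + 1))]
  by_cases h : 2 * a + 1 ≤ s ∧ s < a + N
  · rw [if_pos (by omega), if_pos h]
    have : a + 1 + (s - (2 * a + 1)) = s - a := by omega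
    simp [this]
  · rw [if_neg (by omega), if_neg h]
    simp

theorem pvSearch_mirror (get : Int → PySem.Set Int) (N : Nat) (bucket : List Int)
    (hbq : ∀ iN : Nat, iN + 2 ≤ N → ((bucket.getD (2 * iN + 1) 0 = 1) ↔
      pvSmInner get ((N : Nat) : Int) ((iN : Nat) : Int)
        (PySem.List.pyRange 0 ((N : Nat) : Int) 1) 0 = 1)) :
    ∀ lst : List Int, (∀ i ∈ lst, 0 ≤ i ∧ i < ((N : Nat) : Int) - 1) →
    pvSmSearch bucket lst =
      if pvSmMirror get ((N : Nat) : Int) lst = -1 then 0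
      else pvSmMirror get ((N : Nat) : Int) lst + 1 := by
  intro lst
  induction lst with
  | nil => intro _; simp [pvSmSearch, pvSmMirror]
  | cons i is ih =>
    intro hmem
    have hi := hmem i (by simp)
    obtain ⟨iN, rfl⟩ : ∃ iN : Nat, i = (iN : Int) := ⟨i.toNat, by omega⟩
    have hiN : iN + 2 ≤ N := by omega
    have ht : (2 * ((iN : Nat) : Int) + 1).toNat = 2 * iN + 1 := by omega
    simp only [pvSmSearch, pvSmMirror, ht]
    by_cases hc : pvSmInner get ((N : Nat) : Int) ((iN : Nat) : Int)
        (PySem.List.pyRange 0 ((N : Nat) : Int) 1) 0 = 1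
    · rw [if_pos ((hbq iN hiN).mpr hc), if_pos hc, if_neg (by omega)]
    · rw [if_neg (fun h => hc ((hbq iN hiN).mp h)), if_neg hc]
      exact ih (fun i hi => hmem i (by simp [hi]))

-- B's bucket procedure agrees with A's smudge-mirror search whenever the stored masks
-- encode the sets A's dict holds
theorem pvSmudge_eq (get : Int → PySem.Set Int) (masks : List Nat) (N K : Nat)
    (hlen : masks.length = N)
    (hget : ∀ k : Nat, k < N → (get ((k : Nat) : Int)).Nodup ∧
      (∀ e ∈ get ((k : Nat) : Int), 0 ≤ e ∧ e < (K : Int)) ∧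
      masks.getD k 0 = pvMaskOf (get ((k : Nat) : Int))) :
    pvSmudge masks =
      if pvSmMirror get ((N : Nat) : Int) (PySem.List.pyRange 0 (((N : Nat) : Int) - 1) 1) = -1
      then 0
      else pvSmMirror get ((N : Nat) : Int) (PySem.List.pyRange 0 (((N : Nat) : Int) - 1) 1) + 1 := by
  subst hlen
  simp only [pvSmudge, PySem.List.len_eq]
  apply pvSearch_mirror
  · intro iN hiN
    rw [show (2 * iN + 1 : Nat) = (2 * iN + 1 : Nat) from rfl]
    have hb := pvBucket masks (2 * iN + 1) (by omega)
    rw [PySem.List.len_eq] at hb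
    rw [hb, pvBucketCenter masks masks.length iN hiN]
    rw [pvSmInner_eq get masks masks.length K hget iN hiN]
    have hnn : ∀ d ∈ (List.range (min (iN + 1) (masks.length - 1 - iN))).map
        (fun j => pvD masks (iN - j) (iN + j + 1)), 0 ≤ d := by
      intro d hd
      obtain ⟨j, _, rfl⟩ := List.mem_map.mp hd
      exact pvD_nonneg ..
    rw [pvLoop_one_iff _ hnn 0]
    omega
  · intro i hi
    rw [PySem.List.mem_pyRange_one] at hi
    exact ⟨hi.1, by omega⟩

-- vertical axis: B's column-mask buckets match A's cols-dict smudge search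
theorem pvVert_eq (seg : List String) :
    pvSmudge (pvColMasks seg (PySem.Str.len (PySem.List.pyGetD seg 0 ""))) =
      (if pvSmMirror (fun k => PySem.Dict.getD (pvSegSummary seg).2 k [])
            (PySem.Str.len (PySem.List.pyGetD seg 0 ""))
            (PySem.List.pyRange 0 (PySem.Str.len (PySem.List.pyGetD seg 0 "") - 1) 1) = -1 then 0
       else pvSmMirror (fun k => PySem.Dict.getD (pvSegSummary seg).2 k [])
            (PySem.Str.len (PySem.List.pyGetD seg 0 ""))
            (PySem.List.pyRange 0 (PySem.Str.len (PySem.List.pyGetD seg 0 "") - 1) 1) + 1) := by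
  have hw0 : 0 ≤ PySem.Str.len (PySem.List.pyGetD seg 0 "") := by
    rw [PySem.Str.len_eq]; exact Int.natCast_nonneg _
  rw [show PySem.Str.len (PySem.List.pyGetD seg 0 "")
      = (((PySem.Str.len (PySem.List.pyGetD seg 0 "")).toNat : Nat) : Int) from by omega]
  set N := (PySem.Str.len (PySem.List.pyGetD seg 0 "")).toNat with hN
  apply pvSmudge_eq (fun k => PySem.Dict.getD (pvSegSummary seg).2 k []) _ N seg.length
  · rw [pvColMasks_length seg _ (by positivity)]
    simp
  · intro k hk
    have hgetk : PySem.Dict.getD (pvSegSummary seg).2 ((k : Nat) : Int) [] = pvColL seg 0 k :=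
      pvCols_getD seg k
    refine ⟨?_, ?_, ?_⟩
    · simp only [hgetk]; exact pvColL_nodup seg 0 k
    · simp only [hgetk]; exact fun e he => pvColL_bounds seg k e he
    · simp only [hgetk]
      rw [pvColMasks_getD seg _ k (by simpa using hk)]

-- horizontal axis: B's row-mask buckets match A's rows-dict smudge search
theorem pvHor_eq (seg : List String) :
    pvSmudge (seg.map (fun r => pvMask r.toList)) =
      (if pvSmMirror (fun k => PySem.Dict.getD (pvSegSummary seg).1 k [])
            (PySem.List.len seg)
            (PySem.List.pyRange 0 (PySem.List.len seg - 1) 1) = -1 then 0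
       else pvSmMirror (fun k => PySem.Dict.getD (pvSegSummary seg).1 k [])
            (PySem.List.len seg)
            (PySem.List.pyRange 0 (PySem.List.len seg - 1) 1) + 1) := by
  rw [PySem.List.len_eq]
  apply pvSmudge_eq (fun k => PySem.Dict.getD (pvSegSummary seg).1 k [])
    _ seg.length ((seg.map (fun r => r.toList.length)).sum)
  · exact List.length_map ..
  · intro k hks
    have hgetk : PySem.Dict.getD (pvSegSummary seg).1 ((k : Nat) : Int) []
        = pvHxs (seg[k]'hks).toList 0 := by
      rw [pvRows_getD seg k, List.getElem?_eq_getElem hks]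
    refine ⟨?_, ?_, ?_⟩
    · simp only [hgetk]; exact pvHxs_nodup _ 0
    · simp only [hgetk]
      intro e he
      have hb := pvHxs_bounds (seg[k]'hks).toList e he
      have hmem : (seg[k]'hks).toList.length ∈ seg.map (fun r => r.toList.length) :=
        List.mem_map.mpr ⟨seg[k]'hks, List.getElem_mem hks, rfl⟩
      have hle : (seg[k]'hks).toList.length ≤ (seg.map (fun r => r.toList.length)).sum :=
        List.single_le_sum (fun x _ => Nat.zero_le x) _ hmem
      constructor
      · exact hb.1
      · calc e < ((seg[k]'hks).toList.length : Int) := hb.2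
          _ ≤ _ := by exact_mod_cast hle
    · simp only [hgetk]
      have hk' : k < (seg.map (fun r => pvMask r.toList)).length := by simpa using hks
      rw [List.getD_eq_getElem _ _ hk']
      simp only [List.getElem_map]
      exact pvMask_eq _

theorem pvSeg_eq (acc : Int) (seg : List String) :
    (let rc := pvSegSummary seg
     let w : Int := PySem.Str.len (PySem.List.pyGetD seg 0 "")
     let h : Int := PySem.List.len seg
     let _vert := pvFindMirror (fun k => PySem.Dict.getD rc.2 k []) w (PySem.List.pyRange 0 (w - 1) 1)
     let _hor := pvFindMirror (fun k => PySem.Dict.getD rc.1 k []) h (PySem.List.pyRange 0 (h - 1) 1)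
     let nv := pvSmMirror (fun k => PySem.Dict.getD rc.2 k []) w (PySem.List.pyRange 0 (w - 1) 1)
     let nh := pvSmMirror (fun k => PySem.Dict.getD rc.1 k []) h (PySem.List.pyRange 0 (h - 1) 1)
     let acc := if nv ≠ -1 then acc + (nv + 1) else acc
     if nh ≠ -1 then acc + (nh + 1) * 100 else acc) =
    (let width : Int := PySem.Str.len (PySem.List.pyGetD seg 0 "")
     acc + pvSmudge (pvColMasks seg width) + 100 * pvSmudge (seg.map (fun r => pvMask r.toList))) := by
  simp only []
  rw [pvVert_eq seg, pvHor_eq seg]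
  split_ifs <;> omega

theorem pvFold_eq (data : List (List String)) : ∀ acc : Int,
    data.foldl (fun acc seg =>
      let rc := pvSegSummary seg
      let w : Int := PySem.Str.len (PySem.List.pyGetD seg 0 "")
      let h : Int := PySem.List.len seg
      let _vert := pvFindMirror (fun k => PySem.Dict.getD rc.2 k []) w (PySem.List.pyRange 0 (w - 1) 1)
      let _hor := pvFindMirror (fun k => PySem.Dict.getD rc.1 k []) h (PySem.List.pyRange 0 (h - 1) 1)
      let nv := pvSmMirror (fun k => PySem.Dict.getD rc.2 k []) w (PySem.List.pyRange 0 (w - 1) 1)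
      let nh := pvSmMirror (fun k => PySem.Dict.getD rc.1 k []) h (PySem.List.pyRange 0 (h - 1) 1)
      let acc := if nv ≠ -1 then acc + (nv + 1) else acc
      if nh ≠ -1 then acc + (nh + 1) * 100 else acc) acc =
    data.foldl (fun acc seg =>
      let width : Int := PySem.Str.len (PySem.List.pyGetD seg 0 "")
      acc + pvSmudge (pvColMasks seg width) + 100 * pvSmudge (seg.map (fun r => pvMask r.toList))) acc := by
  induction data with
  | nil => intro acc; rfl
  | cons seg rest ih =>
    intro acc
    rw [List.foldl_cons, List.foldl_cons, pvSeg_eq acc seg, ih]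

theorem pv_final (data : List (List String)) : get_checksum_2 data = get_checksum_2_alt data := by
  unfold get_checksum_2 get_checksum_2_alt
  exact pvFold_eq data 0

-- ===== VERDICT (by name: the statement is the Claim_ definition above) =====
theorem get_checksum_2_spec : Claim_equal_get_checksum_2 := by
  intro data _hdom hpre
  unfold Spec_get_checksum_2
  exact pv_final data
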